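-- pv_equiv track=rewrite | github.com/MISTLab/trap-gen | trap/decoder.py | bitStringValid
-- ===== SOURCE A (Python) =====
-- def bitStringValid(bitStrings, noCare = None):
--     """Given a list of bitstring it computes
--     which bits are different from don't-care in
--     every bitstring; I associate 1 to that bit"""
--     validPattern = []
--     for curPattern in bitStrings:
--         for i in range(0, len(curPattern)):
--             if len(validPattern) > i:
--                 if validPattern[i] is None or curPattern[i] is None:
--                     validPattern[i] = noCare
--             else:
--                 if curPattern[i] != None:
--                     validPattern.append(1)
--                 else:
--                     validPattern.append(noCare)
--     return validPattern
-- ===== SOURCE B (Python) =====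
-- def bitStringValid(bitStrings, noCare = None):
--     """Given a list of bitstrings, compute which bit positions are
--     different from don't-care in every bitstring (1 there, noCare elsewhere)."""
--     maxlen = max((len(p) for p in bitStrings), default=0)
--     result = []
--     for i in range(maxlen):
--         if all(p[i] is not None for p in bitStrings if len(p) > i):
--             result.append(1)
--         else:
--             result.append(noCare)
--     return result
-- ===== Notes on version B (the rewrite author's own statement) =====
-- stated objective: simpler
-- what changed: Replaced A's pattern-outer pass that mutates/extends a running validPattern list (with in-place index assignment and conditional appends) by a two-phase transposed computation: first take the maximum pattern length, then build each output position directly as 1 iff every pattern covering that position is non-None; the short-circuiting all() per position avoids A's per-element branch/assignment work.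
import Mathlib
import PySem

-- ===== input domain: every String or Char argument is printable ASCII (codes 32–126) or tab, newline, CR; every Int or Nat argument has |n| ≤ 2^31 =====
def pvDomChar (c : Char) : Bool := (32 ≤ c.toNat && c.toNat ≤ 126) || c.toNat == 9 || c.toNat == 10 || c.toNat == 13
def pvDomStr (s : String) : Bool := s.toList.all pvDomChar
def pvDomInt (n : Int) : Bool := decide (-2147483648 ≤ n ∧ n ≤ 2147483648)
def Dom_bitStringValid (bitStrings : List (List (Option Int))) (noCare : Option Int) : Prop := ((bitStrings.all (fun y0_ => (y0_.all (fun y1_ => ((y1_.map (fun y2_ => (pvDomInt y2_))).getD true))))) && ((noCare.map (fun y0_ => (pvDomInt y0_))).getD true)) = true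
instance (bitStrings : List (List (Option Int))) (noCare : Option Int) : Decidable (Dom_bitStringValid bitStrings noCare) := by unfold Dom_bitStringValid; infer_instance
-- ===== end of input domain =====

-- B replaces A's mutating pattern-outer pass by a two-phase transpose (max length, then one value per position); objective: simpler.

-- ===== PORT A =====
-- one iteration of A's inner `for i in range(0, len(curPattern))` body
def pvStepA (noCare : Option Int) (cur : List (Option Int)) (vp : List (Option Int)) (i : Nat) : List (Option Int) :=
  if i < vp.length then
    if vp.getD i none = none ∨ cur.getD i none = none then vp.set i noCare else vp
  else
    if cur.getD i none ≠ none then vp ++ [some 1] else vp ++ [noCare]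

def bitStringValid (bitStrings : List (List (Option Int))) (noCare : Option Int) : List (Option Int) :=
  bitStrings.foldl (fun vp cur => (List.range cur.length).foldl (pvStepA noCare cur) vp) []

-- ===== PORT B =====
def bitStringValid_alt (bitStrings : List (List (Option Int))) (noCare : Option Int) : List (Option Int) :=
  let maxlen := bitStrings.foldl (fun m p => max m p.length) 0
  (List.range maxlen).map (fun i =>
    if bitStrings.all (fun p => !decide (i < p.length) || decide (p.getD i none ≠ none)) then some 1 else noCare)

-- ===== PRECONDITION & SPEC =====
def Spec_bitStringValid (bitStrings : List (List (Option Int))) (noCare : Option Int) (out : List (Option Int)) : Prop := out = bitStringValid_alt bitStrings noCare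
instance (bitStrings : List (List (Option Int))) (noCare : Option Int) (out : List (Option Int)) : Decidable (Spec_bitStringValid bitStrings noCare out) := by unfold Spec_bitStringValid; infer_instance

-- ===== CLAIM (what is proved, stated in full; the proofs are below) =====
def Claim_equal_bitStringValid : Prop := ∀ (bitStrings : List (List (Option Int))) (noCare : Option Int), Dom_bitStringValid bitStrings noCare → Spec_bitStringValid bitStrings noCare (bitStringValid bitStrings noCare)

-- ===== LEMMAS AND PROOFS =====

-- structural characterization of A's inner loop: merge one pattern into validPattern
def pvMerge (noCare : Option Int) : List (Option Int) → List (Option Int) → List (Option Int)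
  | vp, [] => vp
  | [], c :: cs => (if c ≠ none then some 1 else noCare) :: pvMerge noCare [] cs
  | v :: vs, c :: cs => (if v = none ∨ c = none then noCare else v) :: pvMerge noCare vs cs

theorem pvMerge_length (noCare : Option Int) : ∀ (t vp : List (Option Int)),
    (pvMerge noCare vp t).length = max vp.length t.length := by
  intro t
  induction t with
  | nil => intro vp; simp [pvMerge]
  | cons c cs ih =>
    intro vp
    cases vp with
    | nil => simp [pvMerge, ih]
    | cons v vs => simp [pvMerge, ih]

theorem pvMerge_getD_of_le (noCare : Option Int) : ∀ (t vp : List (Option Int)) (n : Nat),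
    t.length ≤ n → (pvMerge noCare vp t).getD n none = vp.getD n none := by
  intro t
  induction t with
  | nil => intro vp n _; simp [pvMerge]
  | cons c cs ih =>
    intro vp n hn
    simp at hn
    obtain ⟨n', rfl⟩ : ∃ n', n = n' + 1 := ⟨n - 1, by omega⟩
    cases vp with
    | nil =>
      simp [pvMerge]
      have := ih [] n' (by omega)
      simpa using this
    | cons v vs =>
      simp [pvMerge]
      exact ih vs n' (by omega)

theorem pvMerge_append_of_le (noCare : Option Int) : ∀ (t vp : List (Option Int)) (c : Option Int),
    vp.length ≤ t.length →
    pvMerge noCare vp (t ++ [c]) = pvMerge noCare vp t ++ [if c = none then noCare else some 1] := by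
  intro t
  induction t with
  | nil =>
    intro vp c h
    have : vp = [] := List.eq_nil_of_length_eq_zero (by simpa using h)
    subst this; simp [pvMerge]
  | cons x xs ih =>
    intro vp c h
    cases vp with
    | nil =>
      simp only [List.cons_append, pvMerge]
      rw [ih [] c (by simp)]
    | cons v vs =>
      simp only [List.cons_append, pvMerge]
      rw [ih vs c (by simpa using h)]

theorem pvMerge_append_of_lt (noCare : Option Int) : ∀ (t vp : List (Option Int)) (c : Option Int),
    t.length < vp.length →
    pvMerge noCare vp (t ++ [c]) =
      if vp.getD t.length none = none ∨ c = none then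
        (pvMerge noCare vp t).set t.length noCare
      else pvMerge noCare vp t := by
  intro t
  induction t with
  | nil =>
    intro vp c h
    cases vp with
    | nil => simp at h
    | cons v vs =>
      simp [pvMerge]
      by_cases hv : v = none <;> by_cases hc : c = none <;> simp [hv, hc]
  | cons x xs ih =>
    intro vp c h
    cases vp with
    | nil => simp at h
    | cons v vs =>
      simp only [List.cons_append, pvMerge]
      rw [ih vs c (by simpa using h)]
      by_cases hcond : vs.getD xs.length none = none ∨ c = none
      · simp only [List.getD_eq_getElem?_getD] at hcond
        simp [hcond, List.getD_eq_getElem?_getD]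
      · simp only [List.getD_eq_getElem?_getD] at hcond
        simp [hcond, List.getD_eq_getElem?_getD]

-- the inner foldl over range n equals merging the first n positions of cur
theorem pvInner_eq_merge_take (noCare : Option Int) (cur : List (Option Int)) :
    ∀ (n : Nat), n ≤ cur.length → ∀ (vp : List (Option Int)),
    (List.range n).foldl (pvStepA noCare cur) vp = pvMerge noCare vp (cur.take n) := by
  intro n
  induction n with
  | zero => intro _ vp; simp [pvMerge]
  | succ n ih =>
    intro hn vp
    rw [List.range_succ, List.foldl_append]
    rw [ih (by omega) vp]
    simp only [List.foldl_cons, List.foldl_nil]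
    have hlt : n < cur.length := by omega
    have htake : cur.take (n + 1) = cur.take n ++ [cur.getD n none] := by
      rw [List.take_add_one, List.getElem?_eq_getElem hlt]
      simp [List.getD_eq_getElem?_getD, List.getElem?_eq_getElem hlt]
    have hlen : (cur.take n).length = n := by simp; omega
    rw [htake]
    unfold pvStepA
    rw [pvMerge_length noCare (cur.take n) vp, hlen]
    by_cases hv : n < vp.length
    · rw [if_pos (by omega)]
      rw [pvMerge_append_of_lt noCare (cur.take n) vp _ (by omega)]
      rw [pvMerge_getD_of_le noCare (cur.take n) vp n (by omega)]
      rw [hlen]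
    · rw [if_neg (by omega)]
      rw [pvMerge_append_of_le noCare (cur.take n) vp _ (by omega)]
      by_cases hc : cur.getD n none = none
      · rw [if_neg (by simpa using hc), if_pos hc]
      · rw [if_pos hc, if_neg hc]

theorem pvInner_eq_merge (noCare : Option Int) (cur vp : List (Option Int)) :
    (List.range cur.length).foldl (pvStepA noCare cur) vp = pvMerge noCare vp cur := by
  rw [pvInner_eq_merge_take noCare cur cur.length le_rfl vp, List.take_length]

-- merging one pattern into a position-indexed map form
theorem pvMerge_map_range (noCare : Option Int) : ∀ (cur : List (Option Int)) (m : Nat) (f : Nat → Option Int),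
    pvMerge noCare ((List.range m).map f) cur =
      (List.range (max m cur.length)).map (fun i =>
        if i < m then
          (if i < cur.length then
            (if f i = none ∨ cur.getD i none = none then noCare else f i)
           else f i)
        else (if cur.getD i none ≠ none then some 1 else noCare)) := by
  intro cur
  induction cur with
  | nil =>
    intro m f
    simp [pvMerge]
    intro a h1 h2
    omega
  | cons c cs ih =>
    intro m f
    cases m with
    | zero =>
      simp only [List.range_zero, List.map_nil, pvMerge]
      have h0 := ih 0 f
      simp only [List.range_zero, List.map_nil] at h0
      rw [h0]
      have h1 : max 0 cs.length = cs.length := by omega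
      have h2 : max 0 (c :: cs).length = cs.length + 1 := by simp
      rw [h1, h2, List.range_succ_eq_map, List.map_cons, List.map_map]
      refine List.cons_eq_cons.mpr ⟨?_, ?_⟩
      · simp
      · apply List.map_congr_left
        intro i hi
        simp
    | succ m' =>
      rw [List.range_succ_eq_map]
      simp only [List.map_cons, List.map_map, pvMerge]
      rw [ih m' (f ∘ Nat.succ)]
      have h2 : max (m' + 1) (c :: cs).length = (max m' cs.length) + 1 := by
        simp only [List.length_cons]; omega
      rw [h2, List.range_succ_eq_map, List.map_cons, List.map_map]
      refine List.cons_eq_cons.mpr ⟨?_, ?_⟩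
      · simp
      · apply List.map_congr_left
        intro i hi
        simp only [Function.comp_apply, List.length_cons, List.getD_cons_succ]
        split_ifs <;> first | rfl | (exfalso; omega)

-- every pattern length is bounded by the foldl max
theorem pvMaxLen_ge : ∀ (bs : List (List (Option Int))) (a : Nat),
    a ≤ bs.foldl (fun m q => max m q.length) a := by
  intro bs
  induction bs with
  | nil => intro a; simp
  | cons q qs ih =>
    intro a
    simp only [List.foldl_cons]
    exact le_trans (le_max_left _ _) (ih _)

theorem pvMaxLen_bound : ∀ (bs : List (List (Option Int))) (p : List (Option Int)) (a : Nat),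
    p ∈ bs → p.length ≤ bs.foldl (fun m q => max m q.length) a := by
  intro bs
  induction bs with
  | nil => intro p a h; simp at h
  | cons q qs ih =>
    intro p a h
    simp only [List.foldl_cons]
    rcases List.mem_cons.mp h with rfl | h'
    · exact le_trans (le_max_right _ _) (pvMaxLen_ge qs _)
    · exact ih p _ h'

-- shorthand for B's per-position value
theorem pvAlt_eq_map (bs : List (List (Option Int))) (noCare : Option Int) :
    bitStringValid_alt bs noCare =
      (List.range (bs.foldl (fun m p => max m p.length) 0)).map (fun i =>
        if bs.all (fun p => !decide (i < p.length) || decide (p.getD i none ≠ none)) then some 1 else noCare) := rfl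

theorem pvMerge_alt (noCare : Option Int) (bs : List (List (Option Int))) (cur : List (Option Int)) :
    pvMerge noCare (bitStringValid_alt bs noCare) cur = bitStringValid_alt (bs ++ [cur]) noCare := by
  rw [pvAlt_eq_map, pvAlt_eq_map, pvMerge_map_range]
  have hM : (bs ++ [cur]).foldl (fun m p => max m p.length) 0
      = max (bs.foldl (fun m p => max m p.length) 0) cur.length := by
    rw [List.foldl_append]; simp
  rw [hM]
  apply List.map_congr_left
  intro i hi
  simp only [List.mem_range] at hi
  set M := bs.foldl (fun m p => max m p.length) 0 with hMdef
  by_cases him : i < M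
  · rw [if_pos him]
    by_cases hic : i < cur.length
    · rw [if_pos hic]
      simp [List.all_append, List.getD_eq_getElem?_getD, hic]
      split_ifs <;> simp_all
    · rw [if_neg hic]
      simp [List.all_append, List.getD_eq_getElem?_getD, hic]
  · have hshort : ∀ p ∈ bs, ¬ i < p.length := by
      intro p hp
      have := pvMaxLen_bound bs p 0 hp
      omega
    have hic : i < cur.length := by omega
    rw [if_neg him]
    simp [List.all_append, List.getD_eq_getElem?_getD, hic]
    have hP : ∀ x ∈ bs, x.length ≤ i ∨ ¬x[i]?.getD none = none := by
      intro x hx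
      exact Or.inl (by have := hshort x hx; omega)
    split_ifs <;> simp_all

theorem pvFold_eq_alt (noCare : Option Int) : ∀ (bs : List (List (Option Int))),
    bitStringValid bs noCare = bitStringValid_alt bs noCare := by
  intro bs
  induction bs using List.reverseRecOn with
  | nil => rfl
  | append_singleton bs cur ih =>
    unfold bitStringValid at *
    rw [List.foldl_append, List.foldl_cons, List.foldl_nil]
    rw [ih, pvInner_eq_merge, pvMerge_alt]

-- ===== VERDICT (by name: the statement is the Claim_ definition above) =====
theorem bitStringValid_spec : Claim_equal_bitStringValid := by
  intro bs noCare _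
  unfold Spec_bitStringValid
  exact pvFold_eq_alt noCare bs
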